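-- pv_equiv track=rewrite | github.com/SaintMonguss/algorithm_programmers | 프로그래머스/1/86491. 최소직사각형/최소직사각형.py | solution
-- ===== SOURCE A (Python) =====
-- def solution(sizes):
--     long, short = sizes[0][0], sizes[0][1]
--     if short > long:
--         short, long = long, short
--     for i in sizes[1:]:
--         if i[0] >= i[1]:
--             long = max(long, i[0])
--             short = max(short, i[1])
--
--         else :
--             long = max(long, i[1])
--             short = max(short, i[0])
--
--     answer = short * long
--     return answer
-- ===== SOURCE B (Python) =====
-- def solution(sizes):
--     # Divide and conquer: the (long, short) dimensions of a block of cards are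
--     # the componentwise max of the dimensions of its two halves.
--     def dims(cards):
--         if len(cards) == 1:
--             w, h = cards[0][0], cards[0][1]
--             return (max(w, h), min(w, h))
--         mid = len(cards) // 2
--         l1, s1 = dims(cards[:mid])
--         l2, s2 = dims(cards[mid:])
--         return (max(l1, l2), max(s1, s2))
--     long, short = dims(sizes)
--     return long * short
-- ===== Notes on version B (the rewrite author's own statement) =====
-- stated objective: alternative
-- what changed: Replaces A's single left-to-right swapping-accumulator loop with a divide-and-conquer recursion: split the card list in half, compute (long, short) of each half recursively, combine with componentwise max, then multiply.
import Mathlib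
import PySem

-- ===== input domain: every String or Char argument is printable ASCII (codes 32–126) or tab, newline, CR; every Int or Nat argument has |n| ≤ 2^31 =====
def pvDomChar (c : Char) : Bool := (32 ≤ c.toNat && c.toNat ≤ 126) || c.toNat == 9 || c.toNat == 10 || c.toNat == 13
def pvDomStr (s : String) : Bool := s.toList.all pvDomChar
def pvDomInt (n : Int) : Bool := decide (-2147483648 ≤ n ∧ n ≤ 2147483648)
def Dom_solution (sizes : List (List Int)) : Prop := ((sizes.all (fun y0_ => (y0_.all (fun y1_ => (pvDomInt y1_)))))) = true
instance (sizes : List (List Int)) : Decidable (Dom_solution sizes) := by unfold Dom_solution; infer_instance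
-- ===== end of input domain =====

-- B computes (long, short) by divide-and-conquer (split in half, componentwise max of the halves) instead of A's single swapping-accumulator loop; equal on all non-empty lists of cards with at least two sides.


-- ===== PORT A =====
def solution (sizes : List (List Int)) : Int :=
  let first := PySem.List.pyGetD sizes 0 []
  let long0 := PySem.List.pyGetD first 0 0
  let short0 := PySem.List.pyGetD first 1 0
  let p0 : Int × Int := if short0 > long0 then (short0, long0) else (long0, short0)
  let p := (PySem.List.slice sizes (some 1) none).foldl
    (fun (p : Int × Int) i =>
      if PySem.List.pyGetD i 0 0 ≥ PySem.List.pyGetD i 1 0 then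
        (max p.1 (PySem.List.pyGetD i 0 0), max p.2 (PySem.List.pyGetD i 1 0))
      else
        (max p.1 (PySem.List.pyGetD i 1 0), max p.2 (PySem.List.pyGetD i 0 0))) p0
  p.2 * p.1

-- ===== PORT B =====
-- Python B's `dims` recurses on len(cards) == 1; on the empty list (outside Pre_) the
-- Python would recurse forever, so the port's guard is `length ≤ 1` to stay total —
-- on every input with cards present the two conditions coincide.
def solutionDims (cards : List (List Int)) : Int × Int :=
  if h : cards.length ≤ 1 then
    let c := PySem.List.pyGetD cards 0 []
    (max (PySem.List.pyGetD c 0 0) (PySem.List.pyGetD c 1 0),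
     min (PySem.List.pyGetD c 0 0) (PySem.List.pyGetD c 1 0))
  else
    let mid : Int := (cards.length : Int) / 2
    let p1 := solutionDims (PySem.List.slice cards none (some mid))
    let p2 := solutionDims (PySem.List.slice cards (some mid) none)
    (max p1.1 p2.1, max p1.2 p2.2)
termination_by cards.length
decreasing_by
  · have : (((cards.length : Int) / 2) : Int) = ((cards.length / 2 : Nat) : Int) := by
      omega
    rw [this, PySem.List.slice_to_natCast]
    simp only [List.length_take]
    omega
  · have : (((cards.length : Int) / 2) : Int) = ((cards.length / 2 : Nat) : Int) := by
      omega
    rw [this, PySem.List.slice_from_natCast]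
    simp only [List.length_drop]
    omega

def solution_alt (sizes : List (List Int)) : Int :=
  let p := solutionDims sizes
  p.1 * p.2

-- ===== PRECONDITION & SPEC =====
-- Pre_ excludes exactly the inputs where A raises: empty sizes (IndexError on sizes[0])
-- and any card with fewer than two entries (IndexError on i[0]/i[1]).
def Pre_solution (sizes : List (List Int)) : Prop :=
  sizes ≠ [] ∧ ∀ s ∈ sizes, 2 ≤ s.length
instance (sizes : List (List Int)) : Decidable (Pre_solution sizes) := by unfold Pre_solution; infer_instance
def pvWitness_solution : List (List Int) := [[60, 50], [30, 70]]

def Spec_solution (sizes : List (List Int)) (out : Int) : Prop := out = solution_alt sizes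
instance (sizes : List (List Int)) (out : Int) : Decidable (Spec_solution sizes out) := by unfold Spec_solution; infer_instance

-- ===== CLAIM (what is proved, stated in full; the proofs are below) =====
def Claim_equal_solution : Prop := ∀ (sizes : List (List Int)), Dom_solution sizes → Pre_solution sizes → Spec_solution sizes (solution sizes)

-- ===== LEMMAS AND PROOFS =====

-- per-card longer and shorter side
def pvMx (c : List Int) : Int := max (PySem.List.pyGetD c 0 0) (PySem.List.pyGetD c 1 0)
def pvMn (c : List Int) : Int := min (PySem.List.pyGetD c 0 0) (PySem.List.pyGetD c 1 0)

-- max of f over a nonempty list, written as A's foldl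
def pvBig (f : List Int → Int) : List (List Int) → Int
  | [] => 0
  | c :: t => t.foldl (fun a i => max a (f i)) (f c)

theorem pv_foldl_max_comm (f : List Int → Int) (t : List (List Int)) :
    ∀ a b : Int, t.foldl (fun a i => max a (f i)) (max a b) = max a (t.foldl (fun a i => max a (f i)) b) := by
  induction t with
  | nil => intro a b; simp
  | cons x t ih =>
      intro a b
      simp only [List.foldl_cons]
      have h : max (max a b) (f x) = max a (max b (f x)) := by omega
      rw [h, ih]

theorem pvBig_append (f : List Int → Int) (l1 l2 : List (List Int)) (h1 : l1 ≠ []) (h2 : l2 ≠ []) :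
    pvBig f (l1 ++ l2) = max (pvBig f l1) (pvBig f l2) := by
  cases l1 with
  | nil => exact absurd rfl h1
  | cons c t =>
      cases l2 with
      | nil => exact absurd rfl h2
      | cons d u =>
          simp only [pvBig, List.cons_append, List.foldl_cons, List.foldl_append]
          rw [pv_foldl_max_comm]

-- characterisation of B's divide-and-conquer
theorem solutionDims_eq : ∀ (n : Nat) (cards : List (List Int)), cards.length = n → cards ≠ [] →
    solutionDims cards = (pvBig pvMx cards, pvBig pvMn cards) := by
  intro n
  induction n using Nat.strong_induction_on with
  | _ n ih =>
      intro cards hlen hne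
      rw [solutionDims]
      by_cases h : cards.length ≤ 1
      · rw [dif_pos h]
        obtain ⟨c, t, rfl⟩ : ∃ c t, cards = c :: t := by
          cases cards with
          | nil => exact absurd rfl hne
          | cons c t => exact ⟨c, t, rfl⟩
        have ht : t = [] := by
          cases t with
          | nil => rfl
          | cons _ _ => simp at h
        subst ht
        simp [pvBig, pvMx, pvMn, PySem.List.pyGetD]
      · rw [dif_neg h]
        have hcast : (((cards.length : Int) / 2) : Int) = ((cards.length / 2 : Nat) : Int) := by omega
        simp only [hcast, PySem.List.slice_to_natCast, PySem.List.slice_from_natCast]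
        have hlen2 : 2 ≤ cards.length := by omega
        have htk : (cards.take (cards.length / 2)).length = cards.length / 2 := by
          simp only [List.length_take]; omega
        have hdr : (cards.drop (cards.length / 2)).length = cards.length - cards.length / 2 := by
          simp only [List.length_drop]
        have hne1 : cards.take (cards.length / 2) ≠ [] := by
          intro hc; rw [hc] at htk; simp at htk; omega
        have hne2 : cards.drop (cards.length / 2) ≠ [] := by
          intro hc; rw [hc] at hdr; simp at hdr; omega
        rw [ih (cards.take (cards.length / 2)).length (by rw [htk]; omega) _ rfl hne1,
            ih (cards.drop (cards.length / 2)).length (by rw [hdr]; omega) _ rfl hne2]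
        have hsplit : cards = cards.take (cards.length / 2) ++ cards.drop (cards.length / 2) :=
          (List.take_append_drop _ _).symm
        rw [show pvBig pvMx cards = pvBig pvMx (cards.take (cards.length / 2) ++ cards.drop (cards.length / 2)) by rw [← hsplit],
            show pvBig pvMn cards = pvBig pvMn (cards.take (cards.length / 2) ++ cards.drop (cards.length / 2)) by rw [← hsplit],
            pvBig_append _ _ _ hne1 hne2, pvBig_append _ _ _ hne1 hne2]

-- A's loop, split into the two independent max accumulators
theorem pv_foldl_split (t : List (List Int)) : ∀ (L S : Int),
    t.foldl (fun (p : Int × Int) i =>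
      if PySem.List.pyGetD i 0 0 ≥ PySem.List.pyGetD i 1 0 then
        (max p.1 (PySem.List.pyGetD i 0 0), max p.2 (PySem.List.pyGetD i 1 0))
      else
        (max p.1 (PySem.List.pyGetD i 1 0), max p.2 (PySem.List.pyGetD i 0 0))) (L, S)
    = (t.foldl (fun a i => max a (pvMx i)) L,
       t.foldl (fun a i => max a (pvMn i)) S) := by
  induction t with
  | nil => intro L S; simp
  | cons x t ih =>
      intro L S
      by_cases h : PySem.List.pyGetD x 0 0 ≥ PySem.List.pyGetD x 1 0
      · simp only [List.foldl_cons, if_pos h, ih]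
        unfold pvMx pvMn
        congr 2 <;> omega
      · simp only [List.foldl_cons, if_neg h, ih]
        unfold pvMx pvMn
        congr 2 <;> omega

-- ===== VERDICT =====
theorem solution_spec : Claim_equal_solution := by
  intro sizes _ hpre
  obtain ⟨hne, _⟩ := hpre
  obtain ⟨f, rest, rfl⟩ : ∃ f rest, sizes = f :: rest := by
    cases sizes with
    | nil => exact absurd rfl hne
    | cons f rest => exact ⟨f, rest, rfl⟩
  unfold Spec_solution solution solution_alt
  rw [solutionDims_eq (f :: rest).length _ rfl (by simp)]
  simp only [PySem.List.slice_from_one, List.tail_cons, PySem.List.pyGetD_zero_cons, pvBig]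
  by_cases h : PySem.List.pyGetD f 1 0 > PySem.List.pyGetD f 0 0
  · simp only [if_pos h, pv_foldl_split]
    have h1 : pvMx f = PySem.List.pyGetD f 1 0 := by unfold pvMx; omega
    have h2 : pvMn f = PySem.List.pyGetD f 0 0 := by unfold pvMn; omega
    rw [h1, h2, Int.mul_comm]
  · simp only [if_neg h, pv_foldl_split]
    have h1 : pvMx f = PySem.List.pyGetD f 0 0 := by unfold pvMx; omega
    have h2 : pvMn f = PySem.List.pyGetD f 1 0 := by unfold pvMn; omega
    rw [h1, h2, Int.mul_comm]
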